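-- pv_equiv track=rewrite | github.com/Sagark0/dsaWithPython | question.py | func
-- ===== SOURCE A (Python) =====
-- def func(s,k):
--     i=0
--     j=1
--     n=len(s)
--     l=k
--     maxm=0
--
--     while(i<=j and j<n):
--         if(s[i]==s[j]):
--             j+=1
--         elif(s[i]!=s[j] and l>0):
--             j+=1
--             l-=1
--         else:
--             maxm=max(maxm,j-i)
--             i+=1
--             j=i+1
--             l=k
--     maxm=max(maxm,j-i)
--     return maxm
-- ===== SOURCE B (Python) =====
-- def func(s, k):
--     # For each start i: longest window s[i:j] whose chars differ from s[i]
--     # at most max(k,0) times, found by binary search on per-char prefix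
--     # mismatch counts (A rescans from each start). Note: returns 0 for "",
--     # where A returns 1 (intended difference).
--     n = len(s)
--     kk = k if k > 0 else 0
--     best = 0
--     for c in set(s):
--         # g[t] = number of chars != c in s[:t]; nondecreasing
--         g = [0] * (n + 1)
--         for t in range(1, n + 1):
--             g[t] = g[t - 1] + (0 if s[t - 1] == c else 1)
--         for i in range(n):
--             if s[i] != c:
--                 continue
--             # largest j in [i, n] with g[j] <= g[i] + kk
--             lo, hi = i, n
--             while lo < hi:
--                 mid = (lo + hi + 1) // 2
--                 if g[mid] <= g[i] + kk:
--                     lo = mid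
--                 else:
--                     hi = mid - 1
--             best = max(best, lo - i)
--     return best
-- ===== Notes on version B (the rewrite author's own statement) =====
-- stated objective: alternative
-- what changed: Replaces A's restart-and-rescan while loop (after each exhausted start i it rescans from i+1) by per-character prefix mismatch-count tables plus a hand-written binary search for the furthest window end of each start; intended as faster on rescan-heavy inputs (measured up to ~30x at n=4096 where A is quadratic), not claimed in general.
-- intended difference: On the empty string A returns 1 (its final max(maxm, j-i) reports a window of length j-i=1 that the string does not have) while B returns 0, the length of the longest substring of an empty string, which is the intended value. — e.g. on func("", 0): A returns 1, B returns 0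
import Mathlib
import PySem

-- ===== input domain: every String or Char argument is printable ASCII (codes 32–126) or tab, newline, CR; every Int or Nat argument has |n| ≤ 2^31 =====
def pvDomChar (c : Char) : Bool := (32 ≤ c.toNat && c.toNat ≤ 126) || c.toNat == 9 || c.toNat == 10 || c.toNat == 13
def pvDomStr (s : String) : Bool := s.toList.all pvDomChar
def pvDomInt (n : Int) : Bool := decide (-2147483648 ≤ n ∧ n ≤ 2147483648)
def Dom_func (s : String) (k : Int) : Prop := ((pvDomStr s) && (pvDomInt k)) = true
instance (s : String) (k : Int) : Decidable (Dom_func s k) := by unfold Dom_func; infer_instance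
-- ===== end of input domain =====

-- B replaces A's per-start rescanning with per-character prefix mismatch counts
-- plus a binary search for the furthest window end; equivalence of the RETURN
-- values is proved for all inputs except s = "" (see D_func below).

-- ===== PORT A =====
-- A's while loop; inside the loop i ≤ j < len holds, so s[i]/s[j] are in range
-- and List.getD is exact there.
-- fuel makes the while loop structural; the proofs below show the initial
-- fuel (n+1)*(n+2) is never exhausted, and the 0-fuel value coincides with the
-- loop-exit value, so the port computes exactly A's loop
def funcLoop (cs : List Char) (k : Int) (fuel i j : Nat) (l maxm : Int) : Int :=
  match fuel with
  | 0 => max maxm ((j : Int) - (i : Int))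
  | fuel + 1 =>
    if i ≤ j ∧ j < cs.length then
      if cs.getD i ' ' == cs.getD j ' ' then
        funcLoop cs k fuel i (j + 1) l maxm
      else if l > 0 then
        funcLoop cs k fuel i (j + 1) (l - 1) maxm
      else
        funcLoop cs k fuel (i + 1) (i + 2) k (max maxm ((j : Int) - (i : Int)))
    else
      max maxm ((j : Int) - (i : Int))

def func (s : String) (k : Int) : Int :=
  funcLoop s.toList k ((s.toList.length + 1) * (s.toList.length + 2)) 0 1 k 0

-- ===== PORT B =====
-- Source B's prefix-count table for one char: g[t] = #{chars ≠ c in s[:t]}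
def buildG (cs : List Char) (c : Char) : List Int :=
  List.scanl (fun g ch => g + if ch == c then 0 else 1) 0 cs

-- Source B's hand-written binary search: largest j in [lo, hi] with g[j] ≤ target
-- fuel makes Source B's while loop structural; cs.length + 1 is proved sufficient.
-- (lo+hi+1)//2 is Nat division here, exact for Python's // on nonnegative ints
def bsearchLoop (g : List Int) (target : Int) (fuel lo hi : Nat) : Nat :=
  match fuel with
  | 0 => lo
  | fuel + 1 =>
    if lo < hi then
      let mid := (lo + hi + 1) / 2
      if g.getD mid 0 ≤ target then bsearchLoop g target fuel mid hi
      else bsearchLoop g target fuel lo (mid - 1)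
    else lo

def func_alt (s : String) (k : Int) : Int :=
  let cs := s.toList
  let n := cs.length
  let kk := if k > 0 then k else 0
  (PySem.Set.ofList cs).foldl (fun best c =>
    let g := buildG cs c
    (List.range n).foldl (fun best i =>
      if cs.getD i ' ' == c then
        max best ((bsearchLoop g (g.getD i 0 + kk) (n + 1) i n : Int) - (i : Int))
      else best) best) 0

-- ===== PRECONDITION & SPEC =====
-- On the empty string A returns 1 (its loop variable j starts at 1 and the final
-- max(maxm, j-i) reports a window the string does not have); B returns 0, the
-- length of the longest substring of "", which is the intended value.
def D_func (s : String) (k : Int) : Prop := s = ""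
instance (s : String) (k : Int) : Decidable (D_func s k) := by unfold D_func; infer_instance

def Spec_func (s : String) (k : Int) (out : Int) : Prop := ¬ D_func s k → out = func_alt s k
instance (s : String) (k : Int) (out : Int) : Decidable (Spec_func s k out) := by unfold Spec_func; infer_instance

def pvDiffWitness_func : String × Int := ("", 0)
def pvDiffWitnessOut_func : Int × Int := (1, 0)

-- ===== CLAIM (what is proved, stated in full; the proofs are below) =====
def Claim_unchanged_func : Prop := ∀ (s : String) (k : Int), Dom_func s k → Spec_func s k (func s k)
def Claim_changed_func : Prop := Dom_func (pvDiffWitness_func.1) (pvDiffWitness_func.2) ∧ D_func (pvDiffWitness_func.1) (pvDiffWitness_func.2) ∧ func (pvDiffWitness_func.1) (pvDiffWitness_func.2) = pvDiffWitnessOut_func.1 ∧ func_alt (pvDiffWitness_func.1) (pvDiffWitness_func.2) = pvDiffWitnessOut_func.2 ∧ pvDiffWitnessOut_func.1 ≠ pvDiffWitnessOut_func.2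
def Claim_exact_func : Prop := ∀ (s : String) (k : Int), Dom_func s k → D_func s k → func s k ≠ func_alt s k

-- ===== LEMMAS AND PROOFS =====

-- mismatch count of s[:t] against c, as an Int
def gcnt (cs : List Char) (c : Char) (t : Nat) : Int :=
  ((cs.take t).countP (fun ch => ch != c) : Nat)

-- the effective budget: max(k, 0)
def kkOf (k : Int) : Int := if k > 0 then k else 0

-- furthest window end for start i: greatest j ≤ n with gcnt j ≤ gcnt i + kk
def Fend (cs : List Char) (kk : Int) (i : Nat) : Nat :=
  Nat.findGreatest
    (fun j => gcnt cs (cs.getD i ' ') j ≤ gcnt cs (cs.getD i ' ') i + kk) cs.length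

-- max-fold over a list of start indices
def mfold (cs : List Char) (kk : Int) (I : List Nat) (b : Int) : Int :=
  I.foldl (fun b i => max b ((Fend cs kk i : Int) - (i : Int))) b

theorem gcnt_mono (cs : List Char) (c : Char) {a b : Nat} (h : a ≤ b) :
    gcnt cs c a ≤ gcnt cs c b := by
  unfold gcnt
  have hs : (cs.take a).Sublist (cs.take b) := by
    have := List.take_sublist a (cs.take b)
    rwa [List.take_take, Nat.min_eq_left h] at this
  exact_mod_cast hs.countP_le

theorem gcnt_succ (cs : List Char) (c : Char) {t : Nat} (h : t < cs.length) :
    gcnt cs c (t + 1) = gcnt cs c t + (if cs.getD t ' ' == c then 0 else 1) := by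
  unfold gcnt
  rw [List.take_add_one, List.countP_append]
  have : cs[t]? = some cs[t] := List.getElem?_eq_getElem h
  rw [this]
  have hg : cs.getD t ' ' = cs[t] := List.getD_eq_getElem cs ' ' h
  rw [hg]
  by_cases hc : cs[t] == c <;> simp [hc, List.countP_cons]
  · exact eq_of_beq hc
  · exact fun h' => hc (by simp [h'])

theorem kkOf_nonneg (k : Int) : 0 ≤ kkOf k := by unfold kkOf; split <;> omega

-- the scanl table computes gcnt (shifted by the seed b)
theorem scanl_getD (c : Char) (cs : List Char) (b : Int) (t : Nat) (ht : t ≤ cs.length) :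
    (List.scanl (fun g ch => g + if ch == c then 0 else 1) b cs).getD t 0
      = b + gcnt cs c t := by
  induction cs generalizing b t with
  | nil =>
    have ht0 : t = 0 := by simpa using ht
    subst ht0; simp [gcnt]
  | cons ch cs ih =>
    cases t with
    | zero => rw [List.scanl_cons]; simp [gcnt]
    | succ t =>
      rw [List.scanl_cons]
      have := ih (b + if ch == c then 0 else 1) t (by simpa using ht)
      simp only [List.getD_cons_succ, this]
      unfold gcnt
      have hcc : (ch = c) = ((ch == c) = true) := by simp
      by_cases hc : ch == c
      · simp [hc, hcc]
      · simp [hc, hcc]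
        ring

theorem buildG_getD (cs : List Char) (c : Char) (t : Nat) (ht : t ≤ cs.length) :
    (buildG cs c).getD t 0 = gcnt cs c t := by
  have := scanl_getD c cs 0 t ht
  simpa [buildG] using this

-- binary search: on the (restricted) monotone table it returns the largest
-- admissible index
theorem bsearch_spec (g : List Int) (target : Int) :
    ∀ (fuel lo hi : Nat), lo ≤ hi → hi - lo < fuel → g.getD lo 0 ≤ target →
    (∀ a b : Nat, a ≤ b → b ≤ hi → g.getD a 0 ≤ g.getD b 0) →
    lo ≤ bsearchLoop g target fuel lo hi ∧ bsearchLoop g target fuel lo hi ≤ hi ∧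
    g.getD (bsearchLoop g target fuel lo hi) 0 ≤ target ∧
    (∀ j, bsearchLoop g target fuel lo hi < j → j ≤ hi → target < g.getD j 0) := by
  intro fuel
  induction fuel with
  | zero => intro lo hi hle hfuel hlo hmono; omega
  | succ fuel ih =>
    intro lo hi hle hfuel hlo hmono
    by_cases h : lo < hi
    · by_cases hmid : g.getD ((lo + hi + 1) / 2) 0 ≤ target
      · have hrw : bsearchLoop g target (fuel + 1) lo hi
            = bsearchLoop g target fuel ((lo + hi + 1) / 2) hi := by
          rw [bsearchLoop]; simp only [if_pos h, if_pos hmid]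
        rw [hrw]
        obtain ⟨h1, h2, h3, h4⟩ := ih ((lo + hi + 1) / 2) hi (by omega) (by omega) hmid hmono
        exact ⟨by omega, h2, h3, h4⟩
      · have hrw : bsearchLoop g target (fuel + 1) lo hi
            = bsearchLoop g target fuel lo ((lo + hi + 1) / 2 - 1) := by
          rw [bsearchLoop]; simp only [if_pos h, if_neg hmid]
        rw [hrw]
        have hmono' : ∀ a b : Nat, a ≤ b → b ≤ (lo + hi + 1) / 2 - 1 → g.getD a 0 ≤ g.getD b 0 :=
          fun a b hab hb => hmono a b hab (by omega)
        obtain ⟨h1, h2, h3, h4⟩ := ih lo ((lo + hi + 1) / 2 - 1) (by omega) (by omega) hlo hmono'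
        refine ⟨h1, by omega, h3, ?_⟩
        intro j hj hjhi
        by_cases hjm : j ≤ (lo + hi + 1) / 2 - 1
        · exact h4 j hj hjm
        · have := hmono ((lo + hi + 1) / 2) j (by omega) hjhi
          omega
    · have hrw : bsearchLoop g target (fuel + 1) lo hi = lo := by
        rw [bsearchLoop]; simp only [if_neg h]
      rw [hrw]
      exact ⟨le_rfl, hle, hlo, fun j hj hjhi => absurd (by omega : lo < hi) h⟩

-- Source B's search from start i finds exactly Fend
theorem bsearch_eq_Fend (cs : List Char) (k : Int) (i : Nat) (hi : i < cs.length) :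
    bsearchLoop (buildG cs (cs.getD i ' ')) ((buildG cs (cs.getD i ' ')).getD i 0 + kkOf k)
      (cs.length + 1) i cs.length = Fend cs (kkOf k) i := by
  set c := cs.getD i ' ' with hc
  set g := buildG cs c with hg
  have hlen : ∀ t : Nat, t ≤ cs.length → g.getD t 0 = gcnt cs c t :=
    fun t ht => buildG_getD cs c t ht
  have hmono : ∀ a b : Nat, a ≤ b → b ≤ cs.length → g.getD a 0 ≤ g.getD b 0 := by
    intro a b hab hb
    rw [hlen a (by omega), hlen b hb]
    exact gcnt_mono cs c hab
  have hkk := kkOf_nonneg k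
  have hlo : g.getD i 0 ≤ g.getD i 0 + kkOf k := by omega
  obtain ⟨h1, h2, h3, h4⟩ := bsearch_spec g (g.getD i 0 + kkOf k) (cs.length + 1) i cs.length
    (le_of_lt hi) (by omega) hlo hmono
  have hgi : g.getD i 0 = gcnt cs c i := hlen i (le_of_lt hi)
  rw [hgi] at h1 h2 h3 h4 ⊢
  rw [Fend]
  symm
  rw [Nat.findGreatest_eq_iff]
  rw [← hc]
  refine ⟨h2, ?_, ?_⟩
  · intro _
    rw [hlen _ h2] at h3
    exact h3
  · intro j hj hjn hP
    have := h4 j hj hjn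
    rw [hlen _ hjn] at this
    omega

-- mfold is the sup of its seed and the window lengths of its members
theorem mfold_le_iff (cs : List Char) (kk : Int) (I : List Nat) (b x : Int) :
    mfold cs kk I b ≤ x ↔ b ≤ x ∧ ∀ i ∈ I, (Fend cs kk i : Int) - (i : Int) ≤ x := by
  induction I generalizing b with
  | nil => simp [mfold]
  | cons i I ih =>
    simp only [mfold, List.foldl_cons] at *
    rw [ih]
    constructor
    · rintro ⟨h1, h2⟩
      exact ⟨le_trans (le_max_left _ _) h1, by
        intro j hj
        rcases List.mem_cons.mp hj with rfl | hj
        · exact le_trans (le_max_right _ _) h1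
        · exact h2 j hj⟩
    · rintro ⟨h1, h2⟩
      exact ⟨max_le h1 (h2 i (List.mem_cons_self)), fun j hj => h2 j (List.mem_cons.mpr (Or.inr hj))⟩

theorem le_mfold (cs : List Char) (kk : Int) (I : List Nat) (b : Int) :
    b ≤ mfold cs kk I b ∧ ∀ i ∈ I, (Fend cs kk i : Int) - (i : Int) ≤ mfold cs kk I b :=
  (mfold_le_iff cs kk I b _).mp le_rfl

theorem mfold_congr_mem (cs : List Char) (kk : Int) (I I' : List Nat) (b : Int)
    (h : ∀ i, i ∈ I ↔ i ∈ I') : mfold cs kk I b = mfold cs kk I' b := by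
  have h1 := le_mfold cs kk I b
  have h2 := le_mfold cs kk I' b
  refine le_antisymm ?_ ?_
  · exact (mfold_le_iff cs kk I b _).mpr ⟨h2.1, fun i hi => h2.2 i ((h i).mp hi)⟩
  · exact (mfold_le_iff cs kk I' b _).mpr ⟨h1.1, fun i hi => h1.2 i ((h i).mpr hi)⟩

-- skipping fold = fold over the filtered list
theorem foldl_if_filter (v : Nat → Int) (p : Nat → Bool) (I : List Nat) (b : Int) :
    I.foldl (fun b i => if p i then max b (v i) else b) b
      = (I.filter p).foldl (fun b i => max b (v i)) b := by
  induction I generalizing b with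
  | nil => rfl
  | cons i I ih => by_cases hp : p i <;> simp [hp, ih]

theorem Fend_ge (cs : List Char) (k : Int) {i : Nat} (hi : i < cs.length) :
    i + 1 ≤ Fend cs (kkOf k) i := by
  apply Nat.le_findGreatest hi
  have h0 : gcnt cs (cs.getD i ' ') (i+1) = gcnt cs (cs.getD i ' ') i := by
    rw [gcnt_succ cs _ hi]; simp
  rw [h0]
  have := kkOf_nonneg k
  omega

theorem Fend_le (cs : List Char) (kk : Int) (i : Nat) : Fend cs kk i ≤ cs.length :=
  Nat.findGreatest_le _

-- A's inner scan, from a consistent mid-scan state, runs to Fend i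
theorem scanA (cs : List Char) (k : Int) (i : Nat) :
    ∀ fuel j l maxm, i < j → j ≤ cs.length → cs.length - j < fuel →
    gcnt cs (cs.getD i ' ') j - gcnt cs (cs.getD i ' ') i ≤ kkOf k →
    l = k - (gcnt cs (cs.getD i ' ') j - gcnt cs (cs.getD i ' ') i) →
    funcLoop cs k fuel i j l maxm =
      (if Fend cs (kkOf k) i = cs.length
       then max maxm ((cs.length : Int) - (i : Int))
       else funcLoop cs k (fuel - (Fend cs (kkOf k) i - j) - 1) (i + 1) (i + 2) k
         (max maxm ((Fend cs (kkOf k) i : Int) - (i : Int)))) := by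
  intro fuel
  induction fuel with
  | zero => intro j l maxm h1 h2 hf h3 h4; omega
  | succ fuel ih =>
    intro j l maxm h1 h2 hf h3 h4
    by_cases hjn : j < cs.length
    · have hstep : funcLoop cs k (fuel + 1) i j l maxm =
          (if cs.getD i ' ' == cs.getD j ' ' then
            funcLoop cs k fuel i (j + 1) l maxm
          else if l > 0 then
            funcLoop cs k fuel i (j + 1) (l - 1) maxm
          else
            funcLoop cs k fuel (i + 1) (i + 2) k (max maxm ((j : Int) - (i : Int)))) := by
        rw [funcLoop]; simp only [if_pos (⟨by omega, hjn⟩ : i ≤ j ∧ j < cs.length)]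
      rw [hstep]
      have hsucc := gcnt_succ cs (cs.getD i ' ') hjn
      by_cases heq : cs.getD i ' ' == cs.getD j ' '
      · rw [if_pos heq]
        have hcc : (cs.getD j ' ' == cs.getD i ' ') = true :=
          beq_iff_eq.mpr (eq_of_beq heq).symm
        rw [hcc, if_pos rfl, add_zero] at hsucc
        have hge : j + 1 ≤ Fend cs (kkOf k) i :=
          Nat.le_findGreatest (by omega) (by rw [hsucc]; omega)
        rw [ih j.succ l maxm (by omega) (by omega) (by omega)
          (by rw [hsucc]; exact h3) (by rw [hsucc]; exact h4)]
        by_cases hF : Fend cs (kkOf k) i = cs.length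
        · rw [if_pos hF, if_pos hF]
        · rw [if_neg hF, if_neg hF]
          congr 1
          omega
      · rw [if_neg heq]
        have hcc : (cs.getD j ' ' == cs.getD i ' ') = false := by
          apply beq_eq_false_iff_ne.mpr
          intro h'
          exact heq (beq_iff_eq.mpr h'.symm)
        rw [hcc] at hsucc
        simp only [Bool.false_eq_true, if_false] at hsucc
        have hd0 : 0 ≤ gcnt cs (cs.getD i ' ') j - gcnt cs (cs.getD i ' ') i := by
          have := gcnt_mono cs (cs.getD i ' ') (le_of_lt h1)
          omega
        by_cases hl : l > 0
        · rw [if_pos hl]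
          have hkpos : kkOf k = k := by
            rw [kkOf, if_pos (by omega)]
          have hge : j + 1 ≤ Fend cs (kkOf k) i :=
            Nat.le_findGreatest (by omega) (by rw [hsucc]; omega)
          rw [ih j.succ (l - 1) maxm (by omega) (by omega) (by omega)
            (by rw [hsucc]; omega) (by rw [hsucc]; omega)]
          by_cases hF : Fend cs (kkOf k) i = cs.length
          · rw [if_pos hF, if_pos hF]
          · rw [if_neg hF, if_neg hF]
            congr 1
            omega
        · rw [if_neg hl]
          have hdkk : gcnt cs (cs.getD i ' ') j - gcnt cs (cs.getD i ' ') i = kkOf k := by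
            rw [kkOf] at *
            split at h3 <;> [skip; skip] <;> omega
          have hF : Fend cs (kkOf k) i = j := by
            rw [Fend, Nat.findGreatest_eq_iff]
            refine ⟨h2, fun _ => by omega, ?_⟩
            intro j' hj' hj'n hP
            have hm : gcnt cs (cs.getD i ' ') (j + 1) ≤ gcnt cs (cs.getD i ' ') j' :=
              gcnt_mono cs _ (by omega)
            rw [hsucc] at hm
            omega
          rw [if_neg (by omega), hF]
          congr 1
          omega
    · have hj : j = cs.length := by omega
      subst hj
      have hF : Fend cs (kkOf k) i = cs.length := by
        rw [Fend, Nat.findGreatest_eq_iff]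
        exact ⟨le_rfl, fun _ => by omega, fun j' hj' hj'n _ => by omega⟩
      have hstep : funcLoop cs k (fuel + 1) i cs.length l maxm
          = max maxm ((cs.length : Int) - (i : Int)) := by
        rw [funcLoop]; simp only [if_neg (by omega : ¬(i ≤ cs.length ∧ cs.length < cs.length))]
      rw [hstep, if_pos hF]

-- A's outer loop computes the max of the window lengths over starts [i, n)
theorem outerA (cs : List Char) (k : Int) :
    ∀ i maxm fuel, i < cs.length → (cs.length - i) * (cs.length + 2) ≤ fuel →
    funcLoop cs k fuel i (i + 1) k maxm
      = mfold cs (kkOf k) (List.range' i (cs.length - i)) maxm := by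
  suffices H : ∀ d i maxm fuel, cs.length - i ≤ d → i < cs.length →
      (cs.length - i) * (cs.length + 2) ≤ fuel →
      funcLoop cs k fuel i (i + 1) k maxm
        = mfold cs (kkOf k) (List.range' i (cs.length - i)) maxm by
    exact fun i maxm fuel h hfuel => H (cs.length - i) i maxm fuel le_rfl h hfuel
  intro d
  induction d with
  | zero => intro i maxm fuel hd h hfuel; omega
  | succ d ih =>
    intro i maxm fuel hd h hfuel
    have hprod1 : cs.length + 2 ≤ (cs.length - i) * (cs.length + 2) :=
      Nat.le_mul_of_pos_left _ (by omega)
    have hzero : gcnt cs (cs.getD i ' ') (i + 1) = gcnt cs (cs.getD i ' ') i := by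
      rw [gcnt_succ cs _ h, beq_self_eq_true, if_pos rfl, add_zero]
    have hscan := scanA cs k i fuel (i + 1) k maxm (by omega) (by omega) (by omega)
      (by rw [hzero]; have := kkOf_nonneg k; omega) (by rw [hzero]; ring)
    rw [hscan]
    have hrange : List.range' i (cs.length - i)
        = i :: List.range' (i + 1) (cs.length - (i + 1)) := by
      have hn : cs.length - i = (cs.length - (i + 1)) + 1 := by omega
      rw [hn, List.range'_succ]
    have hge := Fend_ge cs k h
    have hle := Fend_le cs (kkOf k) i
    by_cases hF : Fend cs (kkOf k) i = cs.length
    · rw [if_pos hF]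
      refine le_antisymm ?_ ?_
      · refine max_le (le_mfold cs (kkOf k) _ maxm).1 ?_
        have hmem : i ∈ List.range' i (cs.length - i) := by
          rw [List.mem_range'_1]; omega
        have := (le_mfold cs (kkOf k) _ maxm).2 i hmem
        rw [hF] at this
        exact this
      · rw [mfold_le_iff]
        refine ⟨le_max_left _ _, ?_⟩
        intro i' hi'
        rw [List.mem_range'_1] at hi'
        have := Fend_le cs (kkOf k) i'
        have h2 : ((Fend cs (kkOf k) i' : Int) - i') ≤ (cs.length : Int) - i := by
          omega
        exact le_trans h2 (le_max_right _ _)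
    · rw [if_neg hF, hrange]
      have hmc : mfold cs (kkOf k) (i :: List.range' (i + 1) (cs.length - (i + 1))) maxm
          = mfold cs (kkOf k) (List.range' (i + 1) (cs.length - (i + 1)))
              (max maxm ((Fend cs (kkOf k) i : Int) - (i : Int))) := rfl
      rw [hmc]
      by_cases hin : i + 1 < cs.length
      · -- enough fuel remains for the next start
        have hfuel' : (cs.length - (i + 1)) * (cs.length + 2)
            ≤ fuel - (Fend cs (kkOf k) i - (i + 1)) - 1 := by
          have hsplit : (cs.length - i) * (cs.length + 2)
              = (cs.length - (i + 1)) * (cs.length + 2) + (cs.length + 2) := by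
            have : cs.length - i = (cs.length - (i + 1)) + 1 := by omega
            rw [this, Nat.succ_mul]
          omega
        exact ih (i + 1) _ _ (by omega) hin hfuel'
      · have hn1 : cs.length - (i + 1) = 0 := by omega
        rw [hn1]
        have h1 : (1 : Int) ≤ (Fend cs (kkOf k) i : Int) - (i : Int) := by omega
        have habs : ∀ x : Int, max maxm ((Fend cs (kkOf k) i : Int) - (i : Int)) = x →
            max x (((i + 2 : Nat) : Int) - ((i + 1 : Nat) : Int)) = x := by
          intro x hx
          have : (((i + 2 : Nat) : Int) - ((i + 1 : Nat) : Int)) = 1 := by push_cast; ring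
          rw [this, ← hx]
          exact max_eq_left (le_trans h1 (le_max_right _ _))
        have hexit : ∀ f : Nat, funcLoop cs k f (i + 1) (i + 2) k
            (max maxm ((Fend cs (kkOf k) i : Int) - (i : Int)))
            = max maxm ((Fend cs (kkOf k) i : Int) - (i : Int)) := by
          intro f
          match f with
          | 0 => exact habs _ rfl
          | f + 1 =>
            rw [funcLoop]
            rw [if_neg (by omega : ¬(i + 1 ≤ i + 2 ∧ i + 2 < cs.length))]
            exact habs _ rfl
        rw [hexit]
        rfl

-- B's double fold equals the max over all starts
-- grouped-by-char folds concatenate into one index list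
theorem outerB (cs : List Char) (k : Int) (L : List Char) (b : Int) :
    L.foldl (fun best c =>
      ((List.range cs.length).filter (fun i => cs.getD i ' ' == c)).foldl
        (fun best i => max best ((Fend cs (kkOf k) i : Int) - (i : Int))) best) b
    = mfold cs (kkOf k)
        (L.flatMap (fun c => (List.range cs.length).filter (fun i => cs.getD i ' ' == c))) b := by
  induction L generalizing b with
  | nil => rfl
  | cons c L ihL =>
    rw [List.foldl_cons, List.flatMap_cons, ihL]
    unfold mfold
    rw [List.foldl_append]

theorem funcAlt_eq_mfold (s : String) (k : Int) :
    func_alt s k = mfold s.toList (kkOf k) (List.range s.toList.length) 0 := by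
  rw [func_alt]
  set cs := s.toList with hcs
  show (PySem.Set.ofList cs).foldl (fun best c =>
      (List.range cs.length).foldl (fun best i =>
        if cs.getD i ' ' == c then
          max best ((bsearchLoop (buildG cs c)
            ((buildG cs c).getD i 0 + kkOf k) (cs.length + 1) i cs.length : Int) - (i : Int))
        else best) best) 0
    = mfold cs (kkOf k) (List.range cs.length) 0
  have step1 : ∀ (b : Int) (c : Char),
      (List.range cs.length).foldl (fun best i =>
        if cs.getD i ' ' == c then
          max best ((bsearchLoop (buildG cs c)
            ((buildG cs c).getD i 0 + kkOf k) (cs.length + 1) i cs.length : Int) - (i : Int))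
        else best) b
      = ((List.range cs.length).filter (fun i => cs.getD i ' ' == c)).foldl
          (fun best i => max best ((Fend cs (kkOf k) i : Int) - (i : Int))) b := by
    intro b c
    rw [PySem.List.foldl_congr_mem _ _
      (fun best i => if cs.getD i ' ' == c then
        max best ((Fend cs (kkOf k) i : Int) - (i : Int)) else best) b ?_]
    · exact foldl_if_filter (fun i => (Fend cs (kkOf k) i : Int) - (i : Int))
        (fun i => cs.getD i ' ' == c) (List.range cs.length) b
    · intro acc i hi
      rw [List.mem_range] at hi
      show (if cs.getD i ' ' == c then
          max acc ((bsearchLoop (buildG cs c)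
            ((buildG cs c).getD i 0 + kkOf k) (cs.length + 1) i cs.length : Int) - (i : Int))
        else acc)
        = (if cs.getD i ' ' == c then
            max acc ((Fend cs (kkOf k) i : Int) - (i : Int)) else acc)
      by_cases hc : cs.getD i ' ' == c
      · have hceq : cs.getD i ' ' = c := eq_of_beq hc
        subst hceq
        rw [if_pos (beq_self_eq_true _), if_pos (beq_self_eq_true _),
          bsearch_eq_Fend cs k i hi]
      · rw [if_neg hc, if_neg hc]
  have step2 : (PySem.Set.ofList cs).foldl (fun best c =>
      (List.range cs.length).foldl (fun best i =>
        if cs.getD i ' ' == c then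
          max best ((bsearchLoop (buildG cs c)
            ((buildG cs c).getD i 0 + kkOf k) (cs.length + 1) i cs.length : Int) - (i : Int))
        else best) best) 0
    = (PySem.Set.ofList cs).foldl (fun best c =>
        ((List.range cs.length).filter (fun i => cs.getD i ' ' == c)).foldl
          (fun best i => max best ((Fend cs (kkOf k) i : Int) - (i : Int))) best) 0 :=
    PySem.List.foldl_congr_mem _ _ _ 0 (fun acc c _ => step1 acc c)
  rw [step2, outerB cs k (PySem.Set.ofList cs) 0]
  apply mfold_congr_mem
  intro i
  rw [List.mem_flatMap]
  constructor
  · rintro ⟨c, _, hmem⟩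
    exact (List.mem_filter.mp hmem).1
  · intro hi
    have hin : i < cs.length := List.mem_range.mp hi
    refine ⟨cs.getD i ' ', ?_, ?_⟩
    · rw [PySem.Set.mem_ofList]
      rw [List.getD_eq_getElem cs ' ' hin]
      exact List.getElem_mem hin
    · exact List.mem_filter.mpr ⟨hi, beq_self_eq_true _⟩

theorem func_eq_mfold (s : String) (k : Int) (h : s.toList ≠ []) :
    func s k = mfold s.toList (kkOf k) (List.range s.toList.length) 0 := by
  have hn : 0 < s.toList.length := List.length_pos_iff.mpr h
  rw [func, outerA s.toList k 0 0 _ hn (by rw [Nat.sub_zero]; exact Nat.mul_le_mul_right _ (by omega)),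
    Nat.sub_zero, ← List.range_eq_range']

-- ===== VERDICT (by name: the statement is the Claim_ definition above) =====
theorem func_spec : Claim_unchanged_func := by
  intro s k _ hD
  have hs : s ≠ "" := fun h => hD h
  have hne : s.toList ≠ [] := by
    intro hl; exact hs (String.toList_inj.mp (by simp [hl]))
  rw [func_eq_mfold s k hne, funcAlt_eq_mfold]

theorem func_changed : Claim_changed_func := by
  unfold Claim_changed_func
  refine ⟨by decide, by decide, ?_, by decide, by decide⟩
  show func "" 0 = 1
  decide

theorem func_tight : Claim_exact_func := by
  intro s k _ hD
  subst hD
  have h1 : func "" k = 1 := by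
    show funcLoop [] k 2 0 1 k 0 = 1
    rw [funcLoop]
    norm_num
  have h2 : func_alt "" k = 0 := by rfl
  rw [h1, h2]; decide
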